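-- pv_equiv track=rewrite | github.com/AdaCore/libadalang | testsuite/tests/python/gpr_context/test.py | text_repr
-- ===== SOURCE A (Python) =====
-- def text_repr(t: str) -> str:
--     result = []
--     for char in t:
--         code = ord(char)
--         result.append(
--             f"\\x{code:02x}" if code < 0x20 or code >= 0x7f else char
--         )
--     return f'"{"".join(result)}"'
-- ===== SOURCE B (Python) =====
-- import re
--
-- _ESCAPED = re.compile(r'[\x00-\x1f\x7f-\U0010ffff]')
--
-- def text_repr(t: str) -> str:
--     return '"%s"' % _ESCAPED.sub(lambda m: f"\\x{ord(m.group()):02x}", t)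
-- ===== Notes on version B (the rewrite author's own statement) =====
-- stated objective: idiomatic
-- what changed: Replaces the explicit per-char loop with list accumulation and join by a precompiled regex over the escaped character class [\x00-\x1f\x7f-\U0010ffff] with a substitution callback, then wraps in quotes.
import Mathlib
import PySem

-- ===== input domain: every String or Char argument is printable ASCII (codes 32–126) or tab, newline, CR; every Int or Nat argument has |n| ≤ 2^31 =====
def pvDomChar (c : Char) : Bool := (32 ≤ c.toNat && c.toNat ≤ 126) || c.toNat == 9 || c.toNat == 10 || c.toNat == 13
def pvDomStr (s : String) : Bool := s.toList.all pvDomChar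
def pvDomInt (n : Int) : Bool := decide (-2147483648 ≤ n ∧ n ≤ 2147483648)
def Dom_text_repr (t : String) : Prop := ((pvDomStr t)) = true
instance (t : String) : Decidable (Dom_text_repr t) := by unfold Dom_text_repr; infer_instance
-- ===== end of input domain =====

-- B replaces A's explicit loop/list accumulation with a regex substitution over the
-- escaped character class (idiomatic; same output on every string).

-- shared helper: f"{n:02x}" (both Pythons use the same format string)
def hexDigit (n : Nat) : Char := if n < 10 then Char.ofNat (48 + n) else Char.ofNat (87 + n)

def hexRep (n : Nat) : List Char :=
  if _h : n < 16 then [hexDigit n]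
  else hexRep (n / 16) ++ [hexDigit (n % 16)]
decreasing_by exact Nat.div_lt_self (by omega) (by omega)

def pyHex02 (n : Nat) : List Char :=
  let ds := hexRep n
  List.replicate (2 - ds.length) '0' ++ ds

-- ===== PORT A =====
def text_repr (t : String) : String :=
  let result := t.toList.foldl
    (fun (acc : List (List Char)) (char : Char) =>
      let code := char.toNat
      acc ++ [if code < 0x20 || 0x7f ≤ code then '\\' :: 'x' :: pyHex02 code else [char]])
    []
  String.mk ('"' :: PySem.Chars.join [] result ++ ['"'])

-- ===== PORT B =====
-- the regex char class [\x00-\x1f\x7f-\U0010ffff]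
def escClass (c : Char) : Bool := c.toNat ≤ 0x1f || 0x7f ≤ c.toNat

-- re.sub with a per-match callback over a single-char class = replace each matching char
def text_repr_alt (t : String) : String :=
  String.mk ('"' :: t.toList.flatMap
    (fun c => if escClass c then '\\' :: 'x' :: pyHex02 c.toNat else [c]) ++ ['"'])

-- ===== PRECONDITION & SPEC =====
def Spec_text_repr (t : String) (out : String) : Prop := out = text_repr_alt t
instance (t : String) (out : String) : Decidable (Spec_text_repr t out) := by unfold Spec_text_repr; infer_instance

-- ===== CLAIM (what is proved, stated in full; the proofs are below) =====
def Claim_equal_text_repr : Prop := ∀ (t : String), Dom_text_repr t → Spec_text_repr t (text_repr t)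

-- ===== LEMMAS AND PROOFS =====

def reprPiece (c : Char) : List Char :=
  if c.toNat < 0x20 || 0x7f ≤ c.toNat then '\\' :: 'x' :: pyHex02 c.toNat else [c]

theorem foldl_pieces (l : List Char) (acc : List (List Char)) :
    l.foldl (fun (acc : List (List Char)) (char : Char) =>
      acc ++ [if char.toNat < 0x20 || 0x7f ≤ char.toNat
              then '\\' :: 'x' :: pyHex02 char.toNat else [char]]) acc
    = acc ++ l.map reprPiece := by
  induction l generalizing acc with
  | nil => simp
  | cons c cs ih =>
    simp only [List.foldl_cons]
    rw [ih]
    simp [reprPiece]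

theorem join_nil_eq_flatten (ps : List (List Char)) :
    PySem.Chars.join [] ps = ps.flatten := by
  induction ps with
  | nil => rw [PySem.Chars.join_nil]; rfl
  | cons p ps ih =>
    cases ps with
    | nil => rw [PySem.Chars.join_singleton]; simp
    | cons q qs =>
      rw [PySem.Chars.join_cons_cons, ih]
      simp

theorem escClass_eq (c : Char) :
    (if escClass c then '\\' :: 'x' :: pyHex02 c.toNat else [c]) = reprPiece c := by
  have hc : (decide (c.toNat ≤ 0x1f)) = (decide (c.toNat < 0x20)) := by
    simp [Nat.lt_succ_iff]
  simp only [escClass, reprPiece, hc]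

-- ===== VERDICT (by name: the statement is the Claim_ definition above) =====
theorem text_repr_spec : Claim_equal_text_repr := by
  intro t _
  unfold Spec_text_repr text_repr text_repr_alt
  simp only [foldl_pieces, List.nil_append, join_nil_eq_flatten, escClass_eq]
  rw [List.flatten_eq_flatMap, List.flatMap_map]
  rfl
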